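-- pv_equiv track=rewrite | github.com/AbiolaArowolo/clarix-pulse | scripts/vps_clean_redeploy.py | build_env_override_lines_with_extra
-- ===== SOURCE A (Python) =====
-- ENV_SYNC_KEYS = (
--     "PULSE_ADMIN_EMAILS",
--     "PULSE_ACCESS_KEY_TTL_DAYS",
--     "PULSE_PASSWORD_RESET_TTL_MINUTES",
--     "PULSE_DOWNLOAD_BUNDLE_PATH",
--     "PULSE_DOWNLOAD_BUNDLE_NAME",
--     "PULSE_DOWNLOAD_SIGNING_SECRET",
--     "PULSE_DOWNLOAD_LINK_TTL_MINUTES",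
-- )
--
-- def build_env_override_lines_with_extra(env: dict[str, str], extra_overrides: dict[str, str]) -> str:
--     lines: list[str] = []
--     values: dict[str, str] = {}
--     for key in ENV_SYNC_KEYS:
--         value = env.get(key)
--         if value is None or value == "":
--             continue
--         values[key] = value
--     for key, value in extra_overrides.items():
--         if value is None or value == "":
--             continue
--         values[key] = value
--     for key in ENV_SYNC_KEYS:
--         value = values.get(key)
--         if value is None or value == "":
--             continue
--         lines.append(f"{key}={value}")
--     return "\n".join(lines)
-- ===== SOURCE B (Python) =====
-- ENV_SYNC_KEYS = (
--     "PULSE_ADMIN_EMAILS",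
--     "PULSE_ACCESS_KEY_TTL_DAYS",
--     "PULSE_PASSWORD_RESET_TTL_MINUTES",
--     "PULSE_DOWNLOAD_BUNDLE_PATH",
--     "PULSE_DOWNLOAD_BUNDLE_NAME",
--     "PULSE_DOWNLOAD_SIGNING_SECRET",
--     "PULSE_DOWNLOAD_LINK_TTL_MINUTES",
-- )
--
--
-- def _pick(env, extra_overrides, key):
--     value = extra_overrides.get(key)
--     if value is None or value == "":
--         value = env.get(key)
--     return value
--
--
-- def build_env_override_lines_with_extra(env: dict[str, str], extra_overrides: dict[str, str]) -> str:
--     return "\n".join(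
--         f"{key}={value}"
--         for key in ENV_SYNC_KEYS
--         for value in [_pick(env, extra_overrides, key)]
--         if value is not None and value != ""
--     )
-- ===== Notes on version B (the rewrite author's own statement) =====
-- stated objective: simpler
-- what changed: Replaces A's three loops and intermediate `values` dict with a single comprehension over ENV_SYNC_KEYS that looks each key up in extra_overrides and falls back to env, keeping the explicit None-or-empty checks.
import Mathlib
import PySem

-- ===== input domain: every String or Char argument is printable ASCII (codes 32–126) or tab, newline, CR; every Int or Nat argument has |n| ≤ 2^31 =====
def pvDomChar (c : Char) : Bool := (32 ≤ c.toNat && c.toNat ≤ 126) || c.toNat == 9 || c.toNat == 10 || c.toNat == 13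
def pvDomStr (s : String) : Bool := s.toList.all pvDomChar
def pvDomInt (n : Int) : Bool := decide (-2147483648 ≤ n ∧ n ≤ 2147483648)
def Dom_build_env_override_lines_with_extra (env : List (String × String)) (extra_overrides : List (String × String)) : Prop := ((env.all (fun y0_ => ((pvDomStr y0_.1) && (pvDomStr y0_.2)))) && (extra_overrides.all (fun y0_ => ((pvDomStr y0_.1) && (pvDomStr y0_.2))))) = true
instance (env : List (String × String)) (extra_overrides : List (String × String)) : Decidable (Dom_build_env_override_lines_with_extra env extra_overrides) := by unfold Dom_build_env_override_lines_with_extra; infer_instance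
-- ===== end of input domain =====

-- B replaces A's three loops and intermediate `values` dict with one pass over ENV_SYNC_KEYS
-- (extra_overrides lookup with env fallback): simpler, same behaviour on valid dict inputs.


-- ===== PORT A =====
def ENV_SYNC_KEYS : List String :=
  ["PULSE_ADMIN_EMAILS",
   "PULSE_ACCESS_KEY_TTL_DAYS",
   "PULSE_PASSWORD_RESET_TTL_MINUTES",
   "PULSE_DOWNLOAD_BUNDLE_PATH",
   "PULSE_DOWNLOAD_BUNDLE_NAME",
   "PULSE_DOWNLOAD_SIGNING_SECRET",
   "PULSE_DOWNLOAD_LINK_TTL_MINUTES"]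

def build_env_override_lines_with_extra (env : List (String × String)) (extra_overrides : List (String × String)) : String :=
  let envD : PySem.Dict String String := PySem.Dict.mk env
  let values1 : PySem.Dict String String :=
    ENV_SYNC_KEYS.foldl (fun vals key =>
      match envD.get? key with
      | none => vals
      | some v => if v = "" then vals else vals.insert key v) PySem.Dict.empty
  let values2 : PySem.Dict String String :=
    extra_overrides.foldl (fun vals kv =>
      if kv.2 = "" then vals else vals.insert kv.1 kv.2) values1
  let lines : List String :=
    ENV_SYNC_KEYS.foldl (fun ls key =>
      match values2.get? key with
      | none => ls
      | some v => if v = "" then ls else ls ++ [key ++ "=" ++ v]) []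
  PySem.Str.join "\n" lines

-- ===== PORT B =====
def pvPick (env : List (String × String)) (extra_overrides : List (String × String)) (key : String) : Option String :=
  let value := (PySem.Dict.mk extra_overrides).get? key
  if value = none ∨ value = some "" then (PySem.Dict.mk env).get? key else value

def build_env_override_lines_with_extra_alt (env : List (String × String)) (extra_overrides : List (String × String)) : String :=
  PySem.Str.join "\n" (ENV_SYNC_KEYS.filterMap (fun key =>
    match pvPick env extra_overrides key with
    | none => none
    | some v => if v = "" then none else some (key ++ "=" ++ v)))

-- ===== PRECONDITION & SPEC =====
-- Pre_ excludes association lists carrying a duplicate key: they do not represent a Python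
-- dict (dict construction collapses duplicates, last value wins), so A's value there is an
-- artefact of the representation and no one would specify either reading.
def Pre_build_env_override_lines_with_extra (env : List (String × String)) (extra_overrides : List (String × String)) : Prop :=
  (env.map Prod.fst).Nodup ∧ (extra_overrides.map Prod.fst).Nodup
instance (env : List (String × String)) (extra_overrides : List (String × String)) : Decidable (Pre_build_env_override_lines_with_extra env extra_overrides) := by unfold Pre_build_env_override_lines_with_extra; infer_instance

def pvWitness_build_env_override_lines_with_extra : (List (String × String)) × (List (String × String)) :=
  ([("PULSE_ADMIN_EMAILS", "a")], [("PULSE_DOWNLOAD_BUNDLE_PATH", "p")])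

def Spec_build_env_override_lines_with_extra (env : List (String × String)) (extra_overrides : List (String × String)) (out : String) : Prop := out = build_env_override_lines_with_extra_alt env extra_overrides
instance (env : List (String × String)) (extra_overrides : List (String × String)) (out : String) : Decidable (Spec_build_env_override_lines_with_extra env extra_overrides out) := by unfold Spec_build_env_override_lines_with_extra; infer_instance

-- ===== CLAIM (what is proved, stated in full; the proofs are below) =====
def Claim_equal_build_env_override_lines_with_extra : Prop := ∀ (env : List (String × String)) (extra_overrides : List (String × String)), Dom_build_env_override_lines_with_extra env extra_overrides → Pre_build_env_override_lines_with_extra env extra_overrides → Spec_build_env_override_lines_with_extra env extra_overrides (build_env_override_lines_with_extra env extra_overrides)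

-- ===== LEMMAS AND PROOFS =====

-- After the extra_overrides loop, a lookup sees the (unique) non-empty extra value, else the base dict.
theorem pv_get_extra_fold (l : List (String × String)) (d : PySem.Dict String String) (k : String)
    (hnd : (l.map Prod.fst).Nodup) :
    (l.foldl (fun vals kv => if kv.2 = "" then vals else vals.insert kv.1 kv.2) d).get? k =
      match (PySem.Dict.mk l).get? k with
      | some v => if v = "" then d.get? k else some v
      | none => d.get? k := by
  induction l generalizing d with
  | nil => simp [PySem.Dict.get?]
  | cons kv rest ih =>
    obtain ⟨k0, v0⟩ := kv
    simp only [List.map_cons, List.nodup_cons] at hnd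
    obtain ⟨hk0, hrest⟩ := hnd
    simp only [List.foldl_cons]
    rw [ih _ hrest, PySem.Dict.get?_mk_cons]
    by_cases hk : k0 = k
    · subst hk
      have hnone : (PySem.Dict.mk rest).get? k0 = none := by
        rw [PySem.Dict.get?_eq_none_iff_not_mem_keys]
        simpa [PySem.Dict.keys] using hk0
      rw [hnone]
      by_cases hv : v0 = "" <;> simp [hv, PySem.Dict.get?_insert_self]
    · have hne : (k0 == k) = false := by simpa using hk
      rw [hne]
      simp only [Bool.false_eq_true, if_false]
      have hbase : ∀ (d : PySem.Dict String String),
          (if v0 = "" then d else d.insert k0 v0).get? k = d.get? k := by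
        intro d
        by_cases hv : v0 = "" <;>
          simp [hv, PySem.Dict.get?_insert, Ne.symm hk]
      cases (PySem.Dict.mk rest).get? k with
      | none => exact hbase d
      | some v => by_cases hv : v = "" <;> simp [hv, hbase]

-- After the first (env-filter) loop over distinct keys, a lookup sees env's non-empty value.
theorem pv_get_env_fold (E : PySem.Dict String String) (keys : List String)
    (d : PySem.Dict String String) (k : String) (hnd : keys.Nodup) :
    (keys.foldl (fun vals key =>
        match E.get? key with
        | none => vals
        | some v => if v = "" then vals else vals.insert key v) d).get? k =
      if k ∈ keys then
        (match E.get? k with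
         | none => d.get? k
         | some v => if v = "" then d.get? k else some v)
      else d.get? k := by
  induction keys generalizing d with
  | nil => simp
  | cons k0 rest ih =>
    simp only [List.nodup_cons] at hnd
    obtain ⟨hk0, hrest⟩ := hnd
    simp only [List.foldl_cons]
    rw [ih _ hrest]
    by_cases hk : k = k0
    · subst hk
      have hnm : k ∉ rest := hk0
      simp only [hnm, if_false, List.mem_cons, true_or, if_true]
      cases hE : E.get? k with
      | none => simp
      | some v => by_cases hv : v = "" <;> simp [hv, PySem.Dict.get?_insert_self]
    · have hstep : ∀ (d : PySem.Dict String String),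
          (match E.get? k0 with
           | none => d
           | some v => if v = "" then d else d.insert k0 v).get? k = d.get? k := by
        intro d
        cases E.get? k0 with
        | none => rfl
        | some v =>
          by_cases hv : v = "" <;> simp [hv, PySem.Dict.get?_insert, hk]
      by_cases hmem : k ∈ rest
      · simp only [hmem, if_true, List.mem_cons, or_true, if_true]
        cases E.get? k with
        | none => exact hstep d
        | some v => by_cases hv : v = "" <;> simp [hv, hstep]
      · simp [hmem, hk, hstep d]

-- The line-building loop is an appending filterMap.
theorem pv_lines_fold (g : String → Option String) (keys : List String) (acc : List String) :
    keys.foldl (fun ls key =>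
      match g key with
      | none => ls
      | some v => if v = "" then ls else ls ++ [key ++ "=" ++ v]) acc =
    acc ++ keys.filterMap (fun key =>
      match g key with
      | none => none
      | some v => if v = "" then none else some (key ++ "=" ++ v)) := by
  induction keys generalizing acc with
  | nil => simp
  | cons k0 rest ih =>
    simp only [List.foldl_cons, List.filterMap_cons]
    cases g k0 with
    | none => simpa using ih acc
    | some v =>
      by_cases hv : v = "" <;> simp [hv, ih]

theorem pv_keys_nodup : ENV_SYNC_KEYS.Nodup := by decide

-- ===== VERDICT (by name: the statement is the Claim_ definition above) =====
theorem build_env_override_lines_with_extra_spec : Claim_equal_build_env_override_lines_with_extra := by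
  intro env extra _hdom hpre
  obtain ⟨_henv, hextra⟩ := hpre
  unfold Spec_build_env_override_lines_with_extra
  unfold build_env_override_lines_with_extra build_env_override_lines_with_extra_alt
  simp only []
  rw [pv_lines_fold]
  simp only [List.nil_append]
  congr 1
  apply List.filterMap_congr
  intro k hk
  rw [pv_get_extra_fold _ _ _ hextra, pv_get_env_fold _ _ _ _ pv_keys_nodup]
  simp only [hk, if_true]
  unfold pvPick
  cases hX : (PySem.Dict.mk extra).get? k with
  | none =>
    simp only []
    cases hE : (PySem.Dict.mk env).get? k with
    | none => simp [PySem.Dict.get?, PySem.Dict.empty]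
    | some w => by_cases hw : w = "" <;> simp [hw, PySem.Dict.get?, PySem.Dict.empty]
  | some v =>
    by_cases hv : v = ""
    · subst hv
      simp only [if_true, or_true]
      cases hE : (PySem.Dict.mk env).get? k with
      | none => simp [PySem.Dict.get?, PySem.Dict.empty]
      | some w => by_cases hw : w = "" <;> simp [hw, PySem.Dict.get?, PySem.Dict.empty]
    · simp [hv]
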